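-- pv_equiv track=rewrite | github.com/mrsac7/pa45 | pa4.py | selectpq
-- ===== SOURCE A (Python) =====
-- import math
--
-- def prime(p):
--     for i in range(2, int(1e9)):
--         if i * i > p:
--             break
--         if p % i == 0:
--             return False
--     return True
--
-- def selectpq(l=800, r=2000):
--     gcd, p = int(1e8), (-1, -1)
--     for p1 in range(l, r + 1):
--         if not prime(p1) or not prime(2 * p1 + 1):
--             continue
--         for p2 in range(p1 + 1, r + 1):
--             if not prime(p2) or not prime(2 * p2 + 1) or (p1 * p2) % 4 != 3:
--                 continue
--             if math.gcd((p1 - 3) // 2, (p2 - 3) // 2) < gcd: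
--                 gcd = math.gcd((p1 - 3) // 2, (p2 - 3) // 2)
--                 p = (p1, p2)
--     return p
-- ===== SOURCE B (Python) =====
-- import math
--
-- def _tdprime(p):
--     # trial division; like A's prime, true for all p <= 3 (incl. negatives)
--     i = 2
--     while i * i <= p:
--         if p % i == 0:
--             return False
--         i += 1
--     return True
--
-- def selectpq(l=800, r=2000):
--     # candidate list built once, then only ordered candidate pairs are scanned
--     cands = [p for p in range(l, r + 1) if _tdprime(p) and _tdprime(2 * p + 1)]
--     best, pair = 10 ** 8, (-1, -1)
--     for i, p1 in enumerate(cands):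
--         m1 = (p1 - 3) // 2
--         for p2 in cands[i + 1:]:
--             if (p1 * p2) % 4 == 3:
--                 g = math.gcd(m1, (p2 - 3) // 2)
--                 if g < best:
--                     best, pair = g, (p1, p2)
--     return pair
-- ===== Notes on version B (the rewrite author's own statement) =====
-- stated objective: alternative
-- what changed: B runs the trial-division primality tests once per number to build the candidate list (numbers p with p and 2p+1 passing the test) in a single pass, then scans only ordered candidate pairs, instead of A's nested range loops that re-run four primality tests for every (p1,p2) pair of the whole range.
import Mathlib
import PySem

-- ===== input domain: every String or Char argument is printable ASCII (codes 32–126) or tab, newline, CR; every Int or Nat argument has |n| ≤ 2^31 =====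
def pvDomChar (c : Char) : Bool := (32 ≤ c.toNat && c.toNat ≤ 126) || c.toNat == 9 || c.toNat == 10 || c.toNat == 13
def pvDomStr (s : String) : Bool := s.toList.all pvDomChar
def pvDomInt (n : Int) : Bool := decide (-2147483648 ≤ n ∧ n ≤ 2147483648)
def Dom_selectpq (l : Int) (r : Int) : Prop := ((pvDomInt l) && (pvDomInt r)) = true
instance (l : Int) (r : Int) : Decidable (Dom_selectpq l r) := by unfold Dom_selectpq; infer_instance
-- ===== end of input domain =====

-- B precomputes the candidate list once (one primality pass) and then scans only ordered
-- candidate pairs, instead of A's nested full-range loops re-testing primality per pair.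

-- ===== PORT A =====
-- prime(p): trial division for i in range(2, int(1e9)), break when i*i > p
-- (the Nat argument is the number of remaining range iterations: 1e9 - i)
def primeLoopA (p : Int) : Int → Nat → Bool
  | _, 0 => true
  | i, n + 1 =>
    if i * i > p then true
    else if PySem.Int.mod p i == 0 then false
    else primeLoopA p (i + 1) n

def primeA (p : Int) : Bool := primeLoopA p 2 999999998

def selectpq (l : Int) (r : Int) : List Int :=
  let st := (PySem.List.pyRange l (r + 1) 1).foldl (fun st p1 =>
    if !primeA p1 || !primeA (2 * p1 + 1) then st
    else (PySem.List.pyRange (p1 + 1) (r + 1) 1).foldl (fun st p2 =>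
      if !primeA p2 || !primeA (2 * p2 + 1) || !(PySem.Int.mod (p1 * p2) 4 == 3) then st
      else if (Int.gcd (PySem.Int.floordiv (p1 - 3) 2) (PySem.Int.floordiv (p2 - 3) 2) : Int) < st.1 then
        ((Int.gcd (PySem.Int.floordiv (p1 - 3) 2) (PySem.Int.floordiv (p2 - 3) 2) : Int), p1, p2)
      else st) st) ((100000000 : Int), (-1 : Int), (-1 : Int))
  [st.2.1, st.2.2]

-- ===== PORT B =====
-- _tdprime(p): while i*i <= p trial division
-- (the Nat fuel p.toNat + 1 bounds the while loop: i*i ≤ p forces i ≤ p, so the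
-- fuel can only run out with i*i > p, where the loop returns true anyway)
def primeLoopB (p : Int) : Int → Nat → Bool
  | _, 0 => true
  | i, n + 1 =>
    if i * i ≤ p then
      if PySem.Int.mod p i == 0 then false
      else primeLoopB p (i + 1) n
    else true

def primeB (p : Int) : Bool := primeLoopB p 2 (p.toNat + 1)

-- cands = [p for p in range(l, r+1) if _tdprime(p) and _tdprime(2*p+1)]
def candsB (l : Int) (r : Int) : List Int :=
  (PySem.List.pyRange l (r + 1) 1).filter (fun p => primeB p && primeB (2 * p + 1))

-- inner loop: for p2 in cands[i+1:] (rest of the candidate list)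
def innerB (p1 : Int) (rest : List Int) (st : Int × Int × Int) : Int × Int × Int :=
  let m1 := PySem.Int.floordiv (p1 - 3) 2
  rest.foldl (fun st p2 =>
    if PySem.Int.mod (p1 * p2) 4 == 3 then
      let g : Int := (Int.gcd m1 (PySem.Int.floordiv (p2 - 3) 2) : Int)
      if g < st.1 then (g, p1, p2) else st
    else st) st

def pairLoopB : List Int → Int × Int × Int → Int × Int × Int
  | [], st => st
  | p1 :: rest, st => pairLoopB rest (innerB p1 rest st)

def selectpq_alt (l : Int) (r : Int) : List Int :=
  let st := pairLoopB (candsB l r) ((100000000 : Int), (-1 : Int), (-1 : Int))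
  [st.2.1, st.2.2]

-- ===== PRECONDITION & SPEC =====
def Spec_selectpq (l : Int) (r : Int) (out : List Int) : Prop := out = selectpq_alt l r
instance (l : Int) (r : Int) (out : List Int) : Decidable (Spec_selectpq l r out) := by unfold Spec_selectpq; infer_instance

-- ===== CLAIM (what is proved, stated in full; the proofs are below) =====
def Claim_equal_selectpq : Prop := ∀ (l : Int) (r : Int), Dom_selectpq l r → Spec_selectpq l r (selectpq l r)

-- ===== LEMMAS AND PROOFS =====

-- A's loop and B's loop agree whenever A's fuel bound 10^9 cannot be reached, i.e. p < 10^18.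
lemma primeLoop_eq (p : Int) (hp : p < 1000000000 * 1000000000) :
    ∀ (nB : Nat) (nA : Nat) (i : Int), 2 ≤ i → i + nA = 1000000000 → p < i + nB →
      primeLoopA p i nA = primeLoopB p i nB := by
  intro nB
  induction nB with
  | zero =>
    intro nA i hi hA hB
    have hii : i ≤ i * i := le_mul_of_one_le_left (by omega) (by omega)
    have hgt : i * i > p := by omega
    cases nA with
    | zero => rfl
    | succ m => rw [primeLoopA, if_pos hgt]; rfl
  | succ nB ih =>
    intro nA i hi hA hB
    by_cases hsq : i * i ≤ p
    · have hii : i ≤ i * i := le_mul_of_one_le_left (by omega) (by omega)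
      have hlt : i < 1000000000 := by
        by_contra hge
        have hge' : (1000000000 : Int) ≤ i := by omega
        have : (1000000000 : Int) * 1000000000 ≤ i * i :=
          mul_le_mul hge' hge' (by norm_num) (by omega)
        omega
      cases nA with
      | zero => omega
      | succ m =>
        rw [primeLoopA, primeLoopB, if_neg (by omega : ¬ i * i > p), if_pos hsq]
        by_cases hm : (PySem.Int.mod p i == 0) = true
        · rw [if_pos hm, if_pos hm]
        · rw [if_neg hm, if_neg hm]
          exact ih m (i + 1) (by omega) (by omega) (by omega)
    · rw [primeLoopB, if_neg hsq]
      cases nA with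
      | zero => rfl
      | succ m => rw [primeLoopA, if_pos (by omega : i * i > p)]

lemma prime_eq (p : Int) (hp : p < 1000000000 * 1000000000) : primeA p = primeB p :=
  primeLoop_eq p hp (p.toNat + 1) 999999998 2 (by norm_num) (by norm_num) (by omega)

def cand (x : Int) : Bool := primeB x && primeB (2 * x + 1)

def stepB (p1 : Int) (st : Int × Int × Int) (p2 : Int) : Int × Int × Int :=
  if PySem.Int.mod (p1 * p2) 4 == 3 then
    if (Int.gcd (PySem.Int.floordiv (p1 - 3) 2) (PySem.Int.floordiv (p2 - 3) 2) : Int) < st.1 then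
      ((Int.gcd (PySem.Int.floordiv (p1 - 3) 2) (PySem.Int.floordiv (p2 - 3) 2) : Int), p1, p2)
    else st
  else st

lemma innerB_eq (p1 : Int) (rest : List Int) (st : Int × Int × Int) :
    innerB p1 rest st = rest.foldl (stepB p1) st := rfl

lemma foldl_filter {σ : Type} (f : σ → Int → σ) (q : Int → Bool) :
    ∀ (t : List Int) (st : σ),
      t.foldl (fun st x => if q x then f st x else st) st = (t.filter q).foldl f st := by
  intro t
  induction t with
  | nil => intro st; rfl
  | cons x t ih =>
    intro st
    by_cases hx : q x <;> simp [List.filter, hx, ih]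

lemma body_eq (p1 p2 : Int) (st : Int × Int × Int)
    (h2 : primeA p2 = primeB p2) (h3 : primeA (2 * p2 + 1) = primeB (2 * p2 + 1)) :
    (if !primeA p2 || !primeA (2 * p2 + 1) || !(PySem.Int.mod (p1 * p2) 4 == 3) then st
     else if (Int.gcd (PySem.Int.floordiv (p1 - 3) 2) (PySem.Int.floordiv (p2 - 3) 2) : Int) < st.1 then
       ((Int.gcd (PySem.Int.floordiv (p1 - 3) 2) (PySem.Int.floordiv (p2 - 3) 2) : Int), p1, p2)
     else st)
    = if cand p2 then stepB p1 st p2 else st := by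
  rw [h2, h3]
  unfold cand stepB
  cases hb : primeB p2 <;> cases hc : primeB (2 * p2 + 1) <;>
    cases hm : (PySem.Int.mod (p1 * p2) 4 == 3) <;> simp_all

def AbodyOuter (r : Int) (st : Int × Int × Int) (p1 : Int) : Int × Int × Int :=
  if !primeA p1 || !primeA (2 * p1 + 1) then st
  else (PySem.List.pyRange (p1 + 1) (r + 1) 1).foldl (fun st p2 =>
    if !primeA p2 || !primeA (2 * p2 + 1) || !(PySem.Int.mod (p1 * p2) 4 == 3) then st
    else if (Int.gcd (PySem.Int.floordiv (p1 - 3) 2) (PySem.Int.floordiv (p2 - 3) 2) : Int) < st.1 then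
      ((Int.gcd (PySem.Int.floordiv (p1 - 3) 2) (PySem.Int.floordiv (p2 - 3) 2) : Int), p1, p2)
    else st) st

lemma AbodyOuter_eq (r a : Int) (ha : a ≤ r) (hr : r ≤ 2147483648) (st : Int × Int × Int) :
    AbodyOuter r st a
      = if cand a then innerB a ((PySem.List.pyRange (a + 1) (r + 1) 1).filter cand) st else st := by
  unfold AbodyOuter
  rw [prime_eq a (by omega), prime_eq (2 * a + 1) (by omega)]
  cases hb : primeB a <;> cases hcb : primeB (2 * a + 1)
  case false.false | false.true | true.false =>
    rw [if_pos (by simp), if_neg (by simp [cand, hb, hcb])]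
  case true.true =>
    rw [if_neg (by simp), if_pos (by simp [cand, hb, hcb])]
    rw [innerB_eq, ← foldl_filter (stepB a) cand]
    refine PySem.List.foldl_congr_mem _ _ _ _ ?_
    intro acc x hx
    rw [PySem.List.mem_pyRange_one] at hx
    exact body_eq a x acc (prime_eq x (by omega)) (prime_eq (2 * x + 1) (by omega))

lemma main_fold' (r : Int) (hr : r ≤ 2147483648) :
    ∀ (n : Nat) (a : Int) (st : Int × Int × Int), (r + 1 - a).toNat ≤ n →
      (PySem.List.pyRange a (r + 1) 1).foldl (AbodyOuter r) st
        = pairLoopB ((PySem.List.pyRange a (r + 1) 1).filter cand) st := by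
  intro n
  induction n with
  | zero =>
    intro a st hle
    rw [PySem.List.pyRange_one_eq_nil (by omega : r + 1 ≤ a)]
    rfl
  | succ n ih =>
    intro a st hle
    by_cases ha : a < r + 1
    · rw [PySem.List.pyRange_one_cons ha]
      rw [List.foldl_cons, List.filter_cons]
      rw [AbodyOuter_eq r a (by omega) hr st]
      by_cases hc : cand a
      · rw [if_pos hc, if_pos hc]
        rw [show pairLoopB (a :: (PySem.List.pyRange (a + 1) (r + 1) 1).filter cand) st
              = pairLoopB ((PySem.List.pyRange (a + 1) (r + 1) 1).filter cand)
                  (innerB a ((PySem.List.pyRange (a + 1) (r + 1) 1).filter cand) st) from rfl]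
        exact ih (a + 1) _ (by omega)
      · rw [if_neg hc, if_neg hc]
        exact ih (a + 1) st (by omega)
    · rw [PySem.List.pyRange_one_eq_nil (by omega : r + 1 ≤ a)]
      rfl

lemma main_fold (r : Int) (hr : r ≤ 2147483648) :
    ∀ (n : Nat) (a : Int) (st : Int × Int × Int), (r + 1 - a).toNat ≤ n →
      (PySem.List.pyRange a (r + 1) 1).foldl (fun st p1 =>
        if !primeA p1 || !primeA (2 * p1 + 1) then st
        else (PySem.List.pyRange (p1 + 1) (r + 1) 1).foldl (fun st p2 =>
          if !primeA p2 || !primeA (2 * p2 + 1) || !(PySem.Int.mod (p1 * p2) 4 == 3) then st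
          else if (Int.gcd (PySem.Int.floordiv (p1 - 3) 2) (PySem.Int.floordiv (p2 - 3) 2) : Int) < st.1 then
            ((Int.gcd (PySem.Int.floordiv (p1 - 3) 2) (PySem.Int.floordiv (p2 - 3) 2) : Int), p1, p2)
          else st) st) st
      = pairLoopB ((PySem.List.pyRange a (r + 1) 1).filter cand) st := by
  intro n a st h
  exact main_fold' r hr n a st h

-- ===== VERDICT (by name: the statement is the Claim_ definition above) =====
theorem selectpq_spec : Claim_equal_selectpq := by
  intro l r hdom
  unfold Spec_selectpq selectpq selectpq_alt candsB
  have hr : r ≤ 2147483648 := by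
    simp [Dom_selectpq, pvDomInt] at hdom; omega
  rw [main_fold r hr (r + 1 - l).toNat l _ le_rfl]
  rfl
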